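-- pv_equiv track=rewrite | github.com/lixiaoruiusa/Rui7272 | AlgoExpert/Heaps/laptopRentals.py | laptopRentals
-- ===== SOURCE A (Python) =====
-- def laptopRentals(times):
--     intervals = []
--     for x, y in times:
--         intervals.append([x, 1])
--         intervals.append([y, -1])
--     intervals = sorted(intervals)
--
--     res = 0
--     running_cost = 0
--     for time, cost in intervals:
--         running_cost += cost
--         res = max(res, running_cost)
--     return res
-- ===== SOURCE B (Python) =====
-- def laptopRentals(times):
--     # Two-pointer sweep over separately sorted start and end times (no event list).
--     starts = sorted(x for x, _ in times)
--     ends = sorted(y for _, y in times)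
--     res = 0
--     count = 0
--     i = 0
--     j = 0
--     n = len(starts)
--     while i < n:
--         if j < n and ends[j] <= starts[i]:
--             count -= 1
--             j += 1
--         else:
--             count += 1
--             i += 1
--             if count > res:
--                 res = count
--     return res
-- ===== Notes on version B (the rewrite author's own statement) =====
-- stated objective: alternative
-- what changed: Replaces A's construction-and-sort of a mixed list of [time, +/-1] events followed by a prefix-sum pass with two separately sorted arrays of start and end times walked by a two-pointer sweep (ends take priority on ties), so no event list is ever materialised.
import Mathlib
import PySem

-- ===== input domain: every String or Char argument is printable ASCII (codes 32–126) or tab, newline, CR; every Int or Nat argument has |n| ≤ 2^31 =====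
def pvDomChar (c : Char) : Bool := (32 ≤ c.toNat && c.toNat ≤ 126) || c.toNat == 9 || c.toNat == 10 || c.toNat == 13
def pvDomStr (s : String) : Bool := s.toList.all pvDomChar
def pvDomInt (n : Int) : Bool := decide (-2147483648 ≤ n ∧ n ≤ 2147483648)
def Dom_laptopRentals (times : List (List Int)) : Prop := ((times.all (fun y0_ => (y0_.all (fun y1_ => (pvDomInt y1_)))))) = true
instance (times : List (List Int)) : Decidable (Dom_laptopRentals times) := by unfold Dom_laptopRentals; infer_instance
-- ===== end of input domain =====

-- B replaces A's sort of a mixed ±1 event list by a two-pointer sweep over separately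
-- sorted start and end times (alternative decomposition, same O(n log n) cost).


-- ===== PORT A =====
-- 'for x, y in times' raises ValueError on a row whose length is not 2; the '_ => []'
-- branch is unreachable under Pre_laptopRentals.
def laptopRentals (times : List (List Int)) : Int :=
  let intervals : List (List Int) :=
    times.foldl (fun acc r =>
      acc ++ (match r with
              | [x, y] => [[x, 1], [y, -1]]
              | _ => [])) []
  let intervalsSorted := PySem.List.sorted intervals (fun e => e) false
  (intervalsSorted.foldl (fun (p : Int × Int) ev =>
      match ev with
      | [_t, c] => (max p.1 (p.2 + c), p.2 + c)
      | _ => p) ((0 : Int), (0 : Int))).1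

-- ===== PORT B =====
-- the while loop of Source B: first list = remaining starts (index i), second = remaining ends (index j)
def goB : List Int → List Int → Int → Int → Int
  | [], _, _, res => res
  | _s :: ss, [], count, res => goB ss [] (count + 1) (max res (count + 1))
  | s :: ss, e :: es, count, res =>
      if e ≤ s then goB (s :: ss) es (count - 1) res
      else goB ss (e :: es) (count + 1) (max res (count + 1))
  termination_by ss es _ _ => ss.length + es.length

-- 'x for x, _ in times' / 'y for _, y in times' (unpacking raises outside Pre_, where these skip)
def rowStart? (r : List Int) : Option Int := if r.length = 2 then r.head? else none

def rowEnd? (r : List Int) : Option Int := if r.length = 2 then r.tail.head? else none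

def laptopRentals_alt (times : List (List Int)) : Int :=
  let starts := PySem.List.sorted (times.filterMap rowStart?) (fun v => v) false
  let ends := PySem.List.sorted (times.filterMap rowEnd?) (fun v => v) false
  goB starts ends 0 0

-- ===== PRECONDITION & SPEC =====
-- Pre_ excludes exactly the rows on which Python's 'for x, y in times' unpacking raises ValueError.
def Pre_laptopRentals (times : List (List Int)) : Prop := ∀ r ∈ times, r.length = 2
instance (times : List (List Int)) : Decidable (Pre_laptopRentals times) := by
  unfold Pre_laptopRentals; infer_instance

def pvWitness_laptopRentals : List (List Int) := [[0, 4], [2, 2], [2, 5]]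

def Spec_laptopRentals (times : List (List Int)) (out : Int) : Prop := out = laptopRentals_alt times
instance (times : List (List Int)) (out : Int) : Decidable (Spec_laptopRentals times out) := by
  unfold Spec_laptopRentals; infer_instance

-- ===== CLAIM (what is proved, stated in full; the proofs are below) =====
def Claim_equal_laptopRentals : Prop := ∀ (times : List (List Int)), Dom_laptopRentals times → Pre_laptopRentals times → Spec_laptopRentals times (laptopRentals times)

-- ===== LEMMAS AND PROOFS =====

-- A's loop body on an event [t, c]
def evStep (p : Int × Int) (ev : List Int) : Int × Int :=
  match ev with
  | [_t, c] => (max p.1 (p.2 + c), p.2 + c)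
  | _ => p

-- merge of the (-1)-events of `es` and the (+1)-events of `ss`, ends first on ties
def mergeE : List Int → List Int → List (List Int)
  | es, [] => es.map (fun e => [e, -1])
  | [], s :: ss => [s, 1] :: mergeE [] ss
  | e :: es, s :: ss =>
      if e ≤ s then [e, -1] :: mergeE es (s :: ss)
      else [s, 1] :: mergeE (e :: es) ss
  termination_by es ss => es.length + ss.length

-- lexicographic order on two-element Int lists, spelled out
theorem lt2_iff (a b c d : Int) : ([a, b] : List Int) < [c, d] ↔ a < c ∨ (a = c ∧ b < d) := by
  show List.Lex (· < ·) _ _ ↔ _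
  constructor
  · intro h
    cases h with
    | rel h => exact Or.inl h
    | cons h =>
        cases h with
        | rel h2 => exact Or.inr ⟨rfl, h2⟩
        | cons h3 => cases h3
  · rintro (h | ⟨rfl, h⟩)
    · exact List.Lex.rel h
    · exact List.Lex.cons (List.Lex.rel h)

theorem le2_iff (a b c d : Int) : ([a, b] : List Int) ≤ [c, d] ↔ a < c ∨ (a = c ∧ b ≤ d) := by
  rw [← not_lt, lt2_iff]
  constructor
  · intro h; by_cases hac : a = c
    · subst hac; right; exact ⟨rfl, by omega⟩
    · left; omega
  · rintro (h | ⟨rfl, h⟩) <;> omega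

theorem mergeE_perm (es ss : List Int) :
    (mergeE es ss).Perm (es.map (fun e => [e, -1]) ++ ss.map (fun s => [s, 1])) := by
  fun_induction mergeE es ss with
  | case1 es => simp
  | case2 s ss ih =>
      simp only [List.map_nil, List.map_cons, List.nil_append] at ih ⊢
      exact ih.cons ([s, 1])
  | case3 e es s ss h ih =>
      simp only [List.map_cons] at ih ⊢
      exact ih.cons ([e, -1])
  | case4 e es s ss h ih =>
      simp only [List.map_cons] at ih ⊢
      exact (ih.cons ([s, 1])).trans (List.perm_middle.symm)

theorem mem_mergeE {z : List Int} {es ss : List Int} (h : z ∈ mergeE es ss) :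
    (∃ e ∈ es, z = [e, -1]) ∨ (∃ s ∈ ss, z = [s, 1]) := by
  have := (mergeE_perm es ss).mem_iff.mp h
  simp only [List.mem_append, List.mem_map] at this
  rcases this with ⟨e, he, rfl⟩ | ⟨s, hs, rfl⟩
  · exact Or.inl ⟨e, he, rfl⟩
  · exact Or.inr ⟨s, hs, rfl⟩

theorem mergeE_pairwise (es ss : List Int)
    (he : es.Pairwise (· ≤ ·)) (hs : ss.Pairwise (· ≤ ·)) :
    (mergeE es ss).Pairwise (· ≤ ·) := by
  fun_induction mergeE es ss with
  | case1 es =>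
      refine List.Pairwise.map _ (fun a b hab => ?_) he
      rw [le2_iff]; omega
  | case2 s ss ih =>
      rcases List.pairwise_cons.mp hs with ⟨hhead, htail⟩
      refine List.pairwise_cons.mpr ⟨fun z hz => ?_, ih List.Pairwise.nil htail⟩
      rcases mem_mergeE hz with ⟨e, he', _⟩ | ⟨s', hs', rfl⟩
      · exact absurd he' (List.not_mem_nil)
      · rw [le2_iff]; have := hhead s' hs'; omega
  | case3 e es s ss hle ih =>
      rcases List.pairwise_cons.mp he with ⟨hhead, htail⟩
      refine List.pairwise_cons.mpr ⟨fun z hz => ?_, ih htail hs⟩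
      rcases mem_mergeE hz with ⟨e', he', rfl⟩ | ⟨s', hs', rfl⟩
      · rw [le2_iff]; have := hhead e' he'; omega
      · rw [le2_iff]
        have : s ≤ s' := by
          rcases List.mem_cons.mp hs' with rfl | h'
          · exact le_rfl
          · exact (List.pairwise_cons.mp hs).1 s' h'
        omega
  | case4 e es s ss hle ih =>
      rcases List.pairwise_cons.mp hs with ⟨hhead, htail⟩
      refine List.pairwise_cons.mpr ⟨fun z hz => ?_, ih he htail⟩
      rcases mem_mergeE hz with ⟨e', he', rfl⟩ | ⟨s', hs', rfl⟩
      · rw [le2_iff]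
        have : e ≤ e' := by
          rcases List.mem_cons.mp he' with rfl | h'
          · exact le_rfl
          · exact (List.pairwise_cons.mp he).1 e' h'
        omega
      · rw [le2_iff]; have := hhead s' hs'; omega

-- folding A's step over pure end-events never raises the running max below/above res
theorem foldl_ends (es : List Int) (res count : Int) (h : count ≤ res) :
    ((es.map (fun e => [e, -1])).foldl evStep (res, count)).1 = res := by
  induction es generalizing count with
  | nil => rfl
  | cons e es ih =>
      simp only [List.map_cons, List.foldl_cons]
      have hstep : evStep (res, count) [e, -1] = (res, count - 1) := by
        simp [evStep]; omega
      rw [hstep]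
      exact ih (count - 1) (by omega)

-- B's two-pointer walk computes A's fold over the merged event list
theorem goB_eq_fold (es ss : List Int) :
    ∀ count res : Int, count ≤ res →
      goB ss es count res = ((mergeE es ss).foldl evStep (res, count)).1 := by
  fun_induction mergeE es ss with
  | case1 es =>
      intro count res h
      simp only [goB]
      exact (foldl_ends _ res count h).symm
  | case2 s ss ih =>
      intro count res h
      rw [goB]
      simp only [List.foldl_cons]
      have hstep : evStep (res, count) [s, 1] = (max res (count + 1), count + 1) := by
        simp [evStep]
      rw [hstep]
      exact ih (count + 1) (max res (count + 1)) (le_max_right _ _)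
  | case3 e es s ss hle ih =>
      intro count res h
      rw [goB, if_pos hle]
      simp only [List.foldl_cons]
      have hstep : evStep (res, count) [e, -1] = (res, count - 1) := by
        simp [evStep]; omega
      rw [hstep]
      exact ih (count - 1) res (by omega)
  | case4 e es s ss hle ih =>
      intro count res h
      rw [goB, if_neg hle]
      simp only [List.foldl_cons]
      have hstep : evStep (res, count) [s, 1] = (max res (count + 1), count + 1) := by
        simp [evStep]
      rw [hstep]
      exact ih (count + 1) (max res (count + 1)) (le_max_right _ _)

-- A's event list is a permutation of the end-events followed by the start-events
theorem flatMap_perm (times : List (List Int)) (hpre : Pre_laptopRentals times) :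
    (times.flatMap (fun r => match r with | [x, y] => [[x, (1 : Int)], [y, -1]] | _ => [])).Perm
      ((times.filterMap rowEnd?).map (fun e => [e, -1]) ++
       (times.filterMap rowStart?).map (fun s => [s, 1])) := by
  induction times with
  | nil => simp
  | cons r t ih =>
      have hr : r.length = 2 := hpre r (List.mem_cons_self)
      have ht : Pre_laptopRentals t := fun r' hr' => hpre r' (List.mem_cons_of_mem _ hr')
      match r, hr with
      | [x, y], _ =>
        simp only [List.flatMap_cons, List.filterMap_cons, rowStart?, rowEnd?]
        exact (((ih ht).cons ([y, -1])).cons ([x, 1])).trans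
          ((List.Perm.swap ([y, -1]) ([x, 1]) _).trans ((List.perm_middle.symm).cons ([y, -1])))

theorem sorted_intervals_eq (times : List (List Int)) (hpre : Pre_laptopRentals times) :
    PySem.List.sorted
      (times.foldl (fun acc r =>
        acc ++ (match r with | [x, y] => [[x, (1 : Int)], [y, -1]] | _ => [])) [])
      (fun e => e) false =
    mergeE
      (PySem.List.sorted (times.filterMap rowEnd?) (fun v => v) false)
      (PySem.List.sorted (times.filterMap rowStart?) (fun v => v) false) := by
  rw [PySem.List.foldl_append_eq_flatMap]
  simp only [List.nil_append]
  have hinst : (fun (a b : List Int) => a.decidableLT b)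
      = (inferInstance : LinearOrder (List Int)).toDecidableLT := Subsingleton.elim _ _
  rw [show ∀ xs : List (List Int),
        @PySem.List.sorted (List Int) (List Int) List.instLT (fun a b => a.decidableLT b) xs (fun e => e) false
        = @PySem.List.sorted (List Int) (List Int) _ (inferInstance : LinearOrder (List Int)).toDecidableLT xs (fun e => e) false
      from fun xs => by rw [hinst]]
  apply PySem.List.sorted_id_eq_of_perm_of_pairwise
  · exact ((mergeE_perm _ _).trans
      (List.Perm.append ((PySem.List.sorted_perm _ _ _).map _) ((PySem.List.sorted_perm _ _ _).map _))).trans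
      (flatMap_perm times hpre).symm
  · exact mergeE_pairwise _ _ (PySem.List.sorted_pairwise _ _) (PySem.List.sorted_pairwise _ _)

-- ===== VERDICT (by name: the statement is the Claim_ definition above) =====
theorem laptopRentals_spec : Claim_equal_laptopRentals := by
  intro times _hdom hpre
  unfold Spec_laptopRentals laptopRentals laptopRentals_alt
  simp only
  rw [sorted_intervals_eq times hpre, goB_eq_fold _ _ 0 0 le_rfl]
  rfl
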